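-- pv_equiv track=rewrite | github.com/atharvesting/mini-projects | YT2Notes/yt2notes.py | merge_rolling_captions
-- ===== SOURCE A (Python) =====
-- def merge_rolling_captions(lines):
--     if not lines:
--         return ""
--
--     merged_text = lines[0]
--
--     for next_line in lines[1:]:
--         context = merged_text[-min(len(merged_text), 100):]
--
--         overlap_len = 0
--         limit = min(len(context), len(next_line))
--
--         for i in range(limit, 0, -1):
--             if context.endswith(next_line[:i]):
--                 overlap_len = i
--                 break
--
--         new_content = next_line[overlap_len:].strip()
--
--         if new_content:
--             if merged_text and merged_text[-1] not in " -" and new_content[0] not in " .,?!":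
--                 merged_text += " "
--             merged_text += new_content
--
--     return merged_text
-- ===== SOURCE B (Python) =====
-- def merge_rolling_captions(lines):
--     if not lines:
--         return ""
--     pieces = [lines[0]]
--     tail = lines[0][-100:]
--     for nl in lines[1:]:
--         m = len(nl)
--         # single left-to-right pass over the match window (only the last
--         # min(m, len(tail)) tail chars can host an overlap), maintaining every
--         # live prefix-match length of nl (NFA-style), instead of testing
--         # overlap lengths one by one
--         window = tail[max(len(tail) - m, 0):]
--         cands = []
--         for c in window:
--             cands = [k + 1 for k in cands + [0] if k < m and nl[k] == c]
--         overlap = max(cands, default=0)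
--         nc = nl[overlap:].strip()
--         if nc:
--             if tail and tail[-1] not in " -" and nc[0] not in " .,?!":
--                 pieces.append(" ")
--                 tail += " "
--             pieces.append(nc)
--             tail = (tail + nc)[-100:]
--     return "".join(pieces)
-- ===== Notes on version B (the rewrite author's own statement) =====
-- stated objective: alternative
-- what changed: B finds each overlap with a single left-to-right pass over the match window (the last min(len(next_line), 100) chars of a running tail) that maintains all live prefix-match lengths of the next line (NFA-style string matching), instead of A's descending brute-force endswith test of every candidate overlap length, and accumulates pieces in a list joined once instead of growing the merged string.
import Mathlib
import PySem

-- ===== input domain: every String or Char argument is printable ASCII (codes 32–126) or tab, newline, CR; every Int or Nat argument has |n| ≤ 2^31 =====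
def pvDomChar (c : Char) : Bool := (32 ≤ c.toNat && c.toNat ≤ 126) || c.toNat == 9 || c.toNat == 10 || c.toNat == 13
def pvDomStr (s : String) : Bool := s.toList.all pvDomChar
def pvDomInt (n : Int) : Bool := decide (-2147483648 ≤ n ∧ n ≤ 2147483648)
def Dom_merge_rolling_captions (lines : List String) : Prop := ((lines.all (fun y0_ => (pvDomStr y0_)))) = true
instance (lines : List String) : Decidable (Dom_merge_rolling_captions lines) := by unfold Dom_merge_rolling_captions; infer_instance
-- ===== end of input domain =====

-- B finds each overlap by a single left-to-right pass over the ≤100-char running tail maintaining all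
-- live prefix-match lengths of the next line (NFA-style matching) and joins accumulated pieces once,
-- instead of A's descending brute-force endswith test of every candidate overlap length on a growing
-- string; an alternative structure, proved to return the same value on all inputs.

-- ===== PORT A =====
-- the Python line 'merged_text[-1] not in " -" and new_content[0] not in " .,?!"'
-- (textually identical in A and B; A reads merged_text, B reads its 100-char tail)
def mrcNeedSpace (s nc : List Char) : Bool :=
  decide (s ≠ []) &&
  (match PySem.List.pyGet? s (-1) with
   | some c => !(c == ' ' || c == '-')
   | none => false) &&
  (match PySem.List.pyGet? nc 0 with
   | some c => !(c == ' ' || c == '.' || c == ',' || c == '?' || c == '!')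
   | none => false)

-- 'for i in range(limit, 0, -1): if context.endswith(next_line[:i]): overlap_len = i; break'
def mrcOverlapA (context nl : List Char) : Nat → Int
  | 0 => 0
  | i + 1 =>
      if PySem.Chars.endswith context (PySem.Chars.slice nl none (some ((i : Int) + 1))) then (i : Int) + 1
      else mrcOverlapA context nl i

def mrcStepA (merged nl : List Char) : List Char :=
  let context := PySem.Chars.slice merged (some (-((min merged.length 100 : Nat) : Int))) none
  let limit := min context.length nl.length
  let overlap := mrcOverlapA context nl limit
  let nc := PySem.Chars.strip (PySem.Chars.slice nl (some overlap) none)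
  if nc = [] then merged
  else (if mrcNeedSpace merged nc then merged ++ [' '] else merged) ++ nc

def merge_rolling_captions (lines : List String) : String :=
  match lines with
  | [] => ""
  | first :: rest => String.ofList (rest.foldl (fun m s => mrcStepA m s.toList) first.toList)

-- ===== PORT B =====
-- 'cands = [k + 1 for k in cands + [0] if k < m and nl[k] == c]'
def mrcCandsStep (nl : List Char) (cands : List Int) (c : Char) : List Int :=
  ((cands ++ [0]).filter
    (fun k => decide (k < (nl.length : Int)) && (PySem.List.pyGet? nl k == some c))).map (· + 1)

-- 'window = tail[max(len(tail) - m, 0):]', 'for c in window: cands = …', 'overlap = max(cands, default=0)'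
def mrcOverlapB (tl nl : List Char) : Int :=
  let window := PySem.Chars.slice tl (some (max ((tl.length : Int) - (nl.length : Int)) 0)) none
  (PySem.List.max? (window.foldl (mrcCandsStep nl) []) (fun x => x)).getD 0

def mrcStepB (st : List (List Char) × List Char) (nl : List Char) : List (List Char) × List Char :=
  let tl := st.2
  let ov := mrcOverlapB tl nl
  let nc := PySem.Chars.strip (PySem.Chars.slice nl (some ov) none)
  if nc = [] then st
  else
    let p2 := if mrcNeedSpace tl nc then st.1 ++ [[' ']] else st.1
    let t2 := if mrcNeedSpace tl nc then tl ++ [' '] else tl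
    (p2 ++ [nc], PySem.Chars.slice (t2 ++ nc) (some (-100)) none)

def merge_rolling_captions_alt (lines : List String) : String :=
  match lines with
  | [] => ""
  | first :: rest =>
      let st := rest.foldl (fun st s => mrcStepB st s.toList)
        ([first.toList], PySem.Chars.slice first.toList (some (-100)) none)
      String.ofList (PySem.Chars.join [] st.1)

-- ===== PRECONDITION & SPEC =====
def Spec_merge_rolling_captions (lines : List String) (out : String) : Prop := out = merge_rolling_captions_alt lines
instance (lines : List String) (out : String) : Decidable (Spec_merge_rolling_captions lines out) := by unfold Spec_merge_rolling_captions; infer_instance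

-- ===== CLAIM (what is proved, stated in full; the proofs are below) =====
def Claim_equal_merge_rolling_captions : Prop := ∀ (lines : List String), Dom_merge_rolling_captions lines → Spec_merge_rolling_captions lines (merge_rolling_captions lines)

-- ===== LEMMAS AND PROOFS =====

-- the last min(len, 100) characters of xs
def tailOf (xs : List Char) : List Char := xs.drop (xs.length - 100)

theorem slice_neg100 (xs : List Char) : PySem.Chars.slice xs (some (-100)) none = tailOf xs := by
  simp only [PySem.Chars.slice_eq_listSlice, tailOf]
  rw [PySem.List.slice_from_neg_ofNat xs 100 (by omega)]

theorem slice_ctx (xs : List Char) :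
    PySem.Chars.slice xs (some (-((min xs.length 100 : Nat) : Int))) none = tailOf xs := by
  simp only [PySem.Chars.slice_eq_listSlice, tailOf]
  rcases Nat.eq_zero_or_pos xs.length with h | h
  · simp [List.eq_nil_of_length_eq_zero h]
  · rw [PySem.List.slice_from_neg_natCast xs (min xs.length 100) (by omega)]
    congr 1; omega

theorem tailOf_nil_iff (xs : List Char) : tailOf xs = [] ↔ xs = [] := by
  constructor
  · intro h
    have := congrArg List.length h
    simp [tailOf] at this
    exact List.eq_nil_of_length_eq_zero (by omega)
  · intro h; simp [h, tailOf]

theorem pyGet_neg_one (xs : List Char) : PySem.List.pyGet? xs (-1) = xs.getLast? := by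
  simp only [PySem.List.pyGet?, PySem.List.pyIdx?, Int.reduceNeg, Int.neg_nonneg, Int.reduceLE,
    ↓reduceIte, neg_le_neg_iff, Nat.one_le_cast, neg_neg, Int.toNat_one]
  rcases xs.eq_nil_or_concat with h | ⟨ys, a, h⟩ <;> subst h <;> simp [List.getLast?_eq_getElem?]

theorem getLast?_tailOf (xs : List Char) : (tailOf xs).getLast? = xs.getLast? := by
  rcases eq_or_ne xs [] with h | h
  · simp [h, tailOf]
  · obtain ⟨pre, hpre⟩ := (List.drop_suffix (xs.length - 100) xs : tailOf xs <:+ xs)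
    conv_rhs => rw [← hpre]
    rw [List.getLast?_append]
    have hne : tailOf xs ≠ [] := fun hc => h ((tailOf_nil_iff xs).1 hc)
    rcases (tailOf xs).eq_nil_or_concat with h2 | ⟨ys, a, h2⟩
    · exact absurd h2 hne
    · rw [show List.drop (xs.length - 100) xs = tailOf xs from rfl, h2]; simp

theorem needSpace_tailOf (m nc : List Char) : mrcNeedSpace (tailOf m) nc = mrcNeedSpace m nc := by
  simp only [mrcNeedSpace, pyGet_neg_one, getLast?_tailOf, tailOf_nil_iff, ne_eq]

theorem join_nil_flatten (parts : List (List Char)) : PySem.Chars.join [] parts = parts.flatten := by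
  simp only [PySem.Chars.join]
  induction parts with
  | nil => simp [List.intercalate]
  | cons a t ih => cases t <;> simp_all [List.intercalate]

theorem tailOf_append (xs ys : List Char) : tailOf (tailOf xs ++ ys) = tailOf (xs ++ ys) := by
  simp only [tailOf, List.length_append, List.length_drop, List.drop_append, List.drop_drop]
  have h1 : xs.length - 100 + (xs.length - (xs.length - 100) + ys.length - 100)
      = xs.length + ys.length - 100 := by omega
  have h2 : xs.length - (xs.length - 100) + ys.length - 100 - (xs.length - (xs.length - 100))
      = xs.length + ys.length - 100 - xs.length := by omega
  rw [h1, h2]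

-- s ++ [a] is a suffix of t ++ [c] iff a = c and s is a suffix of t
theorem concat_suffix_concat (s t : List Char) (a c : Char) :
    s ++ [a] <:+ t ++ [c] ↔ a = c ∧ s <:+ t := by
  rw [show s ++ [a] = (a :: s.reverse).reverse by simp,
      show t ++ [c] = (c :: t.reverse).reverse by simp,
      List.reverse_suffix, List.cons_prefix_cons, List.reverse_prefix]

-- the invariant of B's candidate list: after processing p, the list holds exactly the
-- lengths j ≥ 1 of prefixes of nl that are suffixes of p
theorem cands_mem (nl p : List Char) (x : Int) :
    x ∈ p.foldl (mrcCandsStep nl) [] ↔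
      ∃ j : Nat, x = (j : Int) ∧ 1 ≤ j ∧ j ≤ nl.length ∧ nl.take j <:+ p := by
  induction p using List.reverseRecOn generalizing x with
  | nil =>
      simp only [List.foldl_nil, List.not_mem_nil, false_iff]
      rintro ⟨j, rfl, h1, h2, h3⟩
      rw [List.suffix_nil] at h3
      have : j = 0 ∨ nl = [] := by simpa [List.take_eq_nil_iff] using h3
      rcases this with h | h
      · omega
      · subst h; simp at h2; omega
  | append_singleton p c ih =>
      rw [List.foldl_append, List.foldl_cons, List.foldl_nil]
      simp only [mrcCandsStep, List.mem_map, List.mem_filter, List.mem_append,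
        List.mem_singleton, Bool.and_eq_true, decide_eq_true_eq, beq_iff_eq]
      constructor
      · rintro ⟨k, ⟨hk | hk0, hlt, hget⟩, rfl⟩
        · obtain ⟨j, rfl, h1, h2, h3⟩ := (ih k).1 hk
          have hj : j < nl.length := by exact_mod_cast hlt
          refine ⟨j + 1, by push_cast; ring, by omega, by omega, ?_⟩
          rw [PySem.List.pyGet?_natCast] at hget
          have hgetj : nl[j] = c := by
            have : nl[j]? = some c := hget
            simpa [List.getElem?_eq_getElem hj] using this
          rw [List.take_add_one, List.getElem?_eq_getElem hj]
          simp only [Option.toList]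
          rw [concat_suffix_concat]
          exact ⟨hgetj, h3⟩
        · subst hk0
          have hlen : 0 < nl.length := by exact_mod_cast hlt
          rw [show ((0 : Int)) = ((0 : Nat) : Int) from rfl, PySem.List.pyGet?_natCast] at hget
          have hget0 : nl[0] = c := by
            have : nl[0]? = some c := hget
            simpa [List.getElem?_eq_getElem hlen] using this
          refine ⟨1, by norm_num, le_refl _, hlen, ?_⟩
          rw [List.take_add_one, List.take_zero, List.nil_append, List.getElem?_eq_getElem hlen]
          simp only [Option.toList]
          rw [show ([nl[0]] : List Char) = [] ++ [nl[0]] from rfl, concat_suffix_concat]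
          exact ⟨hget0, List.nil_suffix⟩
      · rintro ⟨j, rfl, h1, h2, h3⟩
        obtain ⟨i, rfl⟩ : ∃ i, j = i + 1 := ⟨j - 1, by omega⟩
        have hi : i < nl.length := by omega
        rw [List.take_add_one, List.getElem?_eq_getElem hi] at h3
        simp only [Option.toList] at h3
        rw [concat_suffix_concat] at h3
        obtain ⟨hgc, hsuf⟩ := h3
        refine ⟨(i : Int), ⟨?_, by exact_mod_cast hi, ?_⟩, by push_cast; ring⟩
        · rcases Nat.eq_zero_or_pos i with rfl | hip
          · right; rfl
          · left; exact (ih _).2 ⟨i, rfl, hip, by omega, hsuf⟩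
        · rw [PySem.List.pyGet?_natCast]
          simp [List.getElem?_eq_getElem hi, hgc]

-- A's descending scan: lower bound by any admissible overlap
theorem overlapA_ge (context nl : List Char) (limit : Nat) (j : Nat)
    (h1 : 1 ≤ j) (h2 : j ≤ limit) (h3 : nl.take j <:+ context) :
    (j : Int) ≤ mrcOverlapA context nl limit := by
  induction limit with
  | zero => omega
  | succ i ih =>
      rw [mrcOverlapA]
      split
      · exact_mod_cast by omega
      · next hend =>
        rcases Nat.lt_or_ge j (i + 1) with hj | hj
        · exact ih (by omega)
        · exfalso
          have hji : j = i + 1 := by omega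
          apply hend
          rw [PySem.Chars.endswith_iff]
          have hs1 : PySem.Chars.slice nl none (some ((i : Int) + 1)) = nl.take (i + 1) := by
            simp only [PySem.Chars.slice_eq_listSlice]
            have hc : ((i : Int) + 1) = ((i + 1 : Nat) : Int) := by push_cast; ring
            rw [hc]; exact PySem.List.slice_to_natCast nl (i + 1)
          rw [hs1, ← hji]; exact h3

-- A's descending scan: its value is 0 or an admissible overlap
theorem overlapA_cases (context nl : List Char) (limit : Nat) :
    mrcOverlapA context nl limit = 0 ∨
      ∃ j : Nat, mrcOverlapA context nl limit = (j : Int) ∧ 1 ≤ j ∧ j ≤ limit ∧ nl.take j <:+ context := by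
  induction limit with
  | zero => left; rfl
  | succ i ih =>
      rw [mrcOverlapA]
      split
      · next hend =>
        right
        refine ⟨i + 1, by push_cast; ring, by omega, le_refl _, ?_⟩
        rw [PySem.Chars.endswith_iff] at hend
        have hs1 : PySem.Chars.slice nl none (some ((i : Int) + 1)) = nl.take (i + 1) := by
          simp only [PySem.Chars.slice_eq_listSlice]
          have hc : ((i : Int) + 1) = ((i + 1 : Nat) : Int) := by push_cast; ring
          rw [hc]; exact PySem.List.slice_to_natCast nl (i + 1)
        rwa [hs1] at hend
      · rcases ih with h | ⟨j, hj, h1, h2, h3⟩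
        · left; exact h
        · right; exact ⟨j, hj, h1, by omega, h3⟩

-- a short suffix of the window is a suffix of the whole tail and vice versa
theorem suffix_window (s t : List Char) (m : Nat) (hs : s.length ≤ m) :
    s <:+ t.drop (t.length - m) ↔ s <:+ t := by
  constructor
  · intro h; exact h.trans (List.drop_suffix _ _)
  · intro h
    have hlen : s.length ≤ t.length := h.length_le
    rw [List.suffix_iff_eq_drop] at h ⊢
    rw [List.drop_drop, List.length_drop]
    rw [show t.length - m + (t.length - (t.length - m) - s.length) = t.length - s.length by omega]
    exact h

-- A's brute-force overlap equals B's live-candidate maximum over the window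
theorem overlapAB (tl nl : List Char) :
    mrcOverlapA tl nl (min tl.length nl.length) = mrcOverlapB tl nl := by
  have hw : PySem.Chars.slice tl (some (max ((tl.length : Int) - (nl.length : Int)) 0)) none
      = tl.drop (tl.length - nl.length) := by
    simp only [PySem.Chars.slice_eq_listSlice]
    rw [show (max ((tl.length : Int) - (nl.length : Int)) 0) = ((tl.length - nl.length : Nat) : Int) by omega]
    exact PySem.List.slice_from_natCast tl (tl.length - nl.length)
  set cands := (tl.drop (tl.length - nl.length)).foldl (mrcCandsStep nl) [] with hc
  have cands_mem' : ∀ x : Int, x ∈ cands ↔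
      ∃ j : Nat, x = (j : Int) ∧ 1 ≤ j ∧ j ≤ nl.length ∧ nl.take j <:+ tl := by
    intro x
    rw [hc, cands_mem]
    constructor
    · rintro ⟨j, rfl, h1, h2, h3⟩
      exact ⟨j, rfl, h1, h2,
        (suffix_window _ tl nl.length (by simp [List.length_take])).1 h3⟩
    · rintro ⟨j, rfl, h1, h2, h3⟩
      exact ⟨j, rfl, h1, h2,
        (suffix_window _ tl nl.length (by simp [List.length_take])).2 h3⟩
  set limit := min tl.length nl.length with hl
  have mem_bound : ∀ j : Nat, 1 ≤ j → j ≤ nl.length → nl.take j <:+ tl → j ≤ limit := by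
    intro j h1 h2 h3
    have := h3.length_le
    simp [List.length_take] at this
    omega
  rcases hmax : PySem.List.max? cands (fun x => x) with _ | m
  · -- candidate list empty: A must return 0
    have hnil : cands = [] := by
      rwa [PySem.List.max?_eq_none_iff] at hmax
    have h0 : mrcOverlapA tl nl limit = 0 := by
      rcases overlapA_cases tl nl limit with h | ⟨j, hj, h1, h2, h3⟩
      · exact h
      · exfalso
        have : (j : Int) ∈ cands := (cands_mem' (j : Int)).2 ⟨j, rfl, h1, by omega, h3⟩
        simp [hnil] at this
    have hB : mrcOverlapB tl nl = 0 := by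
      simp only [mrcOverlapB]
      rw [hw, ← hc, hmax]
      rfl
    rw [h0, hB]
  · have hmem : m ∈ cands := PySem.List.max?_mem hmax
    obtain ⟨jm, rfl, hjm1, hjm2, hjm3⟩ := (cands_mem' m).1 hmem
    have hA_ge : (jm : Int) ≤ mrcOverlapA tl nl limit :=
      overlapA_ge tl nl limit jm hjm1 (mem_bound jm hjm1 hjm2 hjm3) hjm3
    have hA_le : mrcOverlapA tl nl limit ≤ (jm : Int) := by
      rcases overlapA_cases tl nl limit with h | ⟨j, hj, h1, h2, h3⟩
      · rw [h]; exact_mod_cast Int.natCast_nonneg jm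
      · rw [hj]
        have : (j : Int) ∈ cands := (cands_mem' (j : Int)).2 ⟨j, rfl, h1, by omega, h3⟩
        exact PySem.List.max?_isMax hmax _ this
    have hB : mrcOverlapB tl nl = (jm : Int) := by
      simp only [mrcOverlapB]
      rw [hw, ← hc, hmax]
      rfl
    rw [le_antisymm hA_le hA_ge, hB]

theorem step_eq (pieces : List (List Char)) (m tl nl : List Char)
    (hm : m = pieces.flatten) (ht : tl = tailOf m) :
    (mrcStepB (pieces, tl) nl).1.flatten = mrcStepA m nl ∧
    (mrcStepB (pieces, tl) nl).2 = tailOf (mrcStepA m nl) := by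
  have hctx : PySem.Chars.slice m (some (-((min m.length 100 : Nat) : Int))) none = tl := by
    rw [slice_ctx, ht]
  have hov := overlapAB tl nl
  unfold mrcStepA mrcStepB
  simp only [hctx, hov]
  set nc := PySem.Chars.strip (PySem.Chars.slice nl (some (mrcOverlapB tl nl)) none) with hnc
  by_cases hn : nc = []
  · rw [if_pos hn, if_pos hn]; exact ⟨hm.symm, ht⟩
  · rw [if_neg hn, if_neg hn]
    have hns : mrcNeedSpace tl nc = mrcNeedSpace m nc := by rw [ht, needSpace_tailOf]
    rw [hns]
    refine ⟨?_, ?_⟩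
    · rcases hsp : mrcNeedSpace m nc <;>
        simp only [Bool.false_eq_true, ↓reduceIte] <;> simp [hm]
    · rw [slice_neg100]
      rcases hsp : mrcNeedSpace m nc <;>
        simp only [Bool.false_eq_true, ↓reduceIte]
      · rw [ht, tailOf_append]
      · rw [ht, List.append_assoc, List.append_assoc, tailOf_append]

theorem fold_eq (rest : List String) (pieces : List (List Char)) (m tl : List Char)
    (hm : m = pieces.flatten) (ht : tl = tailOf m) :
    (rest.foldl (fun st s => mrcStepB st s.toList) (pieces, tl)).1.flatten
      = rest.foldl (fun acc s => mrcStepA acc s.toList) m ∧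
    (rest.foldl (fun st s => mrcStepB st s.toList) (pieces, tl)).2
      = tailOf (rest.foldl (fun acc s => mrcStepA acc s.toList) m) := by
  induction rest generalizing pieces m tl with
  | nil => simpa using ⟨hm.symm, ht⟩
  | cons s rest ih =>
      obtain ⟨h1, h2⟩ := step_eq pieces m tl s.toList hm ht
      simp only [List.foldl_cons]
      have hst : mrcStepB (pieces, tl) s.toList
          = ((mrcStepB (pieces, tl) s.toList).1, (mrcStepB (pieces, tl) s.toList).2) := Prod.mk.eta.symm
      rw [hst]
      exact ih _ _ _ h1.symm h2

-- ===== VERDICT (by name: the statement is the Claim_ definition above) =====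
theorem merge_rolling_captions_spec : Claim_equal_merge_rolling_captions := by
  intro lines _
  unfold Spec_merge_rolling_captions
  match lines with
  | [] => rfl
  | first :: rest =>
      simp only [merge_rolling_captions, merge_rolling_captions_alt]
      rw [slice_neg100, join_nil_flatten]
      obtain ⟨h1, _⟩ := fold_eq rest [first.toList] first.toList (tailOf first.toList)
        (by simp) rfl
      rw [h1]
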